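-- pv_equiv track=rewrite | github.com/pytorch/torchtitan | torchtitan/experiments/kimi_linear/model/tokenizer.py | _split_whitespaces_or_nonwhitespaces
-- ===== SOURCE A (Python) =====
-- from typing import Any, Iterator, Optional, Union
--
-- def _split_whitespaces_or_nonwhitespaces(
--     s: str, max_consecutive_slice_len: int
-- ) -> Iterator[str]:
--     """
--     Splits the string so that each substring contains no more than
--     max_consecutive_slice_len consecutive whitespaces or non-whitespaces.
--     """
--     if len(s) == 0:
--         return
--
--     current_slice_len = 0
--     current_slice_is_space = s[0].isspace()
--     slice_start = 0
--
--     for i in range(len(s)):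
--         is_now_space = s[i].isspace()
--
--         if current_slice_is_space ^ is_now_space:
--             current_slice_len = 1
--             current_slice_is_space = is_now_space
--         else:
--             current_slice_len += 1
--             if current_slice_len > max_consecutive_slice_len:
--                 yield s[slice_start:i]
--                 slice_start = i
--                 current_slice_len = 1
--     yield s[slice_start:]
-- ===== SOURCE B (Python) =====
-- from itertools import groupby
--
--
-- def _split_whitespaces_or_nonwhitespaces(s, max_consecutive_slice_len):
--     """
--     Splits the string so that each substring contains no more than
--     max_consecutive_slice_len consecutive whitespaces or non-whitespaces.
--     """
--     m = max_consecutive_slice_len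
--     if m <= 0:
--         raise ValueError("max_consecutive_slice_len must be positive")
--     if len(s) == 0:
--         return
--
--     slice_start = 0
--     run_start = 0
--     for _, run in groupby(s, key=str.isspace):
--         run_len = sum(1 for _ in run)
--         for pos in range(run_start + m, run_start + run_len, m):
--             yield s[slice_start:pos]
--             slice_start = pos
--         run_start += run_len
--     yield s[slice_start:]
-- ===== Notes on version B (the rewrite author's own statement) =====
-- stated objective: alternative
-- what changed: Instead of a per-character scan maintaining a run counter, B groups the string into maximal same-type runs with itertools.groupby and emits cut positions inside each run by an arithmetic stride range, keeping one persistent slice_start across runs (grouping and striding skip the per-character interpreted work).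
-- outside the precondition, e.g. on _split_whitespaces_or_nonwhitespaces('ab', 0): A returns ['', 'a', 'b'], B raises ValueError; on _split_whitespaces_or_nonwhitespaces('xy z', -1): A returns ['', 'x', 'y z'], B raises ValueError
import Mathlib
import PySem

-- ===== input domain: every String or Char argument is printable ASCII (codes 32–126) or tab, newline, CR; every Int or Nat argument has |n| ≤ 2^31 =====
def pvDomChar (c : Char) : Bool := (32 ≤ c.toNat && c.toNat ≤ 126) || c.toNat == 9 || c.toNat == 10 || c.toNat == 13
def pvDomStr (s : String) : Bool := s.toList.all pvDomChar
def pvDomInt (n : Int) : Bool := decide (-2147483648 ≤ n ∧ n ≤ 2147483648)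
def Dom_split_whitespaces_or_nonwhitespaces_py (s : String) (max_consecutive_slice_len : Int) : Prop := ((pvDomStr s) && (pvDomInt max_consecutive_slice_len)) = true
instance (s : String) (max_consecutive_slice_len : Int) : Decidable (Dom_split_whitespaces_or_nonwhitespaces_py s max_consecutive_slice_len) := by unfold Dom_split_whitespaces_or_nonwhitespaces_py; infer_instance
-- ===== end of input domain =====

-- B replaces A's per-character counter scan by grouping the string into maximal same-type runs
-- and emitting cut positions inside each run by an arithmetic stride range (same O(n); a timing run measured B faster).


-- ===== PORT A =====
-- state: (current_slice_len, current_slice_is_space, slice_start, yielded slices)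
def pvStA : Type := Int × Bool × Int × List String

-- one iteration of A's `for i in range(len(s))` body; `ch` is s[i]
def pvBodyA (m : Int) (cs : List Char) (t : pvStA) (i : Int) (ch : Char) : pvStA :=
  let is_now_space := PySem.Chars.isspace ch
  if t.2.1 != is_now_space then
    (1, is_now_space, t.2.2.1, t.2.2.2)
  else if t.1 + 1 > m then
    (1, t.2.1, i, t.2.2.2 ++ [String.ofList (PySem.List.slice cs (some t.2.2.1) (some i))])
  else
    (t.1 + 1, t.2.1, t.2.2.1, t.2.2.2)

def split_whitespaces_or_nonwhitespaces_py (s : String) (max_consecutive_slice_len : Int) : List String :=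
  let cs := s.toList
  if cs.length = 0 then [] else
  let init : pvStA := (0, PySem.Chars.isspace (PySem.List.pyGetD cs 0 ' '), 0, [])
  let t := (PySem.List.pyRange 0 cs.length 1).foldl
    (fun t i => pvBodyA max_consecutive_slice_len cs t i (PySem.List.pyGetD cs i ' ')) init
  t.2.2.2 ++ [String.ofList (PySem.List.slice cs (some t.2.2.1) none)]

-- ===== PORT B =====
-- itertools.groupby(s, key=str.isspace): the maximal runs of chars with equal isspace
-- (hand port of groupby, exact: groupby yields exactly these maximal runs in order)
def pvRuns : List Char → List (List Char)
  | [] => []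
  | c :: rest =>
    let p := fun d => PySem.Chars.isspace d == PySem.Chars.isspace c
    (c :: rest.takeWhile p) :: pvRuns (rest.dropWhile p)
termination_by l => l.length
decreasing_by
  simp only [List.length_cons]
  exact Nat.lt_succ_of_le (List.length_dropWhile_le _ _)

-- one cut: yield s[slice_start:pos]; slice_start = pos
def pvCutB (cs : List Char) (u : Int × List String) (pos : Int) : Int × List String :=
  (pos, u.2 ++ [String.ofList (PySem.List.slice cs (some u.1) (some pos))])

-- body of B's outer loop over the runs; state: (slice_start, run_start, yielded slices)
def pvBodyB (m : Int) (cs : List Char) (t : Int × Int × List String) (run : List Char) :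
    Int × Int × List String :=
  let L : Int := run.length
  let u := (PySem.List.pyRange (t.2.1 + m) (t.2.1 + L) m).foldl (pvCutB cs) (t.1, t.2.2)
  (u.1, t.2.1 + L, u.2)

def split_whitespaces_or_nonwhitespaces_py_alt (s : String) (max_consecutive_slice_len : Int) : List String :=
  let cs := s.toList
  if max_consecutive_slice_len ≤ 0 then [] else   -- Source B raises ValueError here (outside Pre_)
  if cs.length = 0 then [] else
  let t := (pvRuns cs).foldl (pvBodyB max_consecutive_slice_len cs) (0, 0, [])
  t.2.2 ++ [String.ofList (PySem.List.slice cs (some t.1) none)]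

-- ===== PRECONDITION & SPEC =====
-- Pre_ excludes max_consecutive_slice_len ≤ 0 (A still returns there: its counter reset then cuts at
-- every index and emits a leading empty slice, an accident of the loop state; the documented contract
-- is unsatisfiable for such lengths and B raises ValueError instead).
def Pre_split_whitespaces_or_nonwhitespaces_py (s : String) (max_consecutive_slice_len : Int) : Prop :=
  1 ≤ max_consecutive_slice_len
instance (s : String) (max_consecutive_slice_len : Int) : Decidable (Pre_split_whitespaces_or_nonwhitespaces_py s max_consecutive_slice_len) := by unfold Pre_split_whitespaces_or_nonwhitespaces_py; infer_instance

def pvWitness_split_whitespaces_or_nonwhitespaces_py : String × Int := ("a  bcd ef", 2)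

def Spec_split_whitespaces_or_nonwhitespaces_py (s : String) (max_consecutive_slice_len : Int) (out : List String) : Prop := out = split_whitespaces_or_nonwhitespaces_py_alt s max_consecutive_slice_len
instance (s : String) (max_consecutive_slice_len : Int) (out : List String) : Decidable (Spec_split_whitespaces_or_nonwhitespaces_py s max_consecutive_slice_len out) := by unfold Spec_split_whitespaces_or_nonwhitespaces_py; infer_instance

-- ===== CLAIM (what is proved, stated in full; the proofs are below) =====
def Claim_equal_split_whitespaces_or_nonwhitespaces_py : Prop := ∀ (s : String) (max_consecutive_slice_len : Int), Dom_split_whitespaces_or_nonwhitespaces_py s max_consecutive_slice_len → Pre_split_whitespaces_or_nonwhitespaces_py s max_consecutive_slice_len → Spec_split_whitespaces_or_nonwhitespaces_py s max_consecutive_slice_len (split_whitespaces_or_nonwhitespaces_py s max_consecutive_slice_len)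

-- ===== LEMMAS AND PROOFS =====

-- pyRange with a positive step: nil and cons unfolding (derived from PySem.List.pyRange_of_pos)
theorem pvPyRange_pos_eq_nil {a b s : Int} (hs : 0 < s) (h : b ≤ a) :
    PySem.List.pyRange a b s = [] := by
  rw [PySem.List.pyRange_of_pos _ _ hs]
  simp [if_neg (not_lt.mpr h)]

theorem pvPyRange_pos_cons {a b s : Int} (hs : 0 < s) (h : a < b) :
    PySem.List.pyRange a b s = a :: PySem.List.pyRange (a + s) b s := by
  rw [PySem.List.pyRange_of_pos _ _ hs, PySem.List.pyRange_of_pos _ _ hs]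
  have hq : (b - a + s - 1) / s = (b - a - 1) / s + 1 := by
    have : b - a + s - 1 = (b - a - 1) + 1 * s := by ring
    rw [this, Int.add_mul_ediv_right _ _ (ne_of_gt hs)]
  have hqn : 0 ≤ (b - a - 1) / s := Int.ediv_nonneg (by omega) (le_of_lt hs)
  rw [if_pos h, hq]
  by_cases h2 : a + s < b
  · have hq2 : (b - (a + s) + s - 1) / s = (b - a - 1) / s := by ring_nf
    rw [if_pos h2, hq2]
    have : ((b - a - 1) / s + 1).toNat = ((b - a - 1) / s).toNat + 1 := by omega
    rw [this, List.range_succ_eq_map, List.map_cons, List.map_map]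
    refine congrArg₂ _ (by ring) ?_
    refine List.map_congr_left (fun k _ => ?_)
    simp only [Function.comp]
    push_cast; ring
  · have hz : (b - a - 1) / s = 0 := Int.ediv_eq_zero_of_lt (by omega) (by omega)
    rw [if_neg h2, hz]
    simp

-- A's index loop, run as a structural recursion over the remaining characters
def pvRunA (m : Int) (cs : List Char) : Int → List Char → pvStA → pvStA
  | _, [], t => t
  | i, ch :: ys, t => pvRunA m cs (i + 1) ys (pvBodyA m cs t i ch)

theorem pvRunA_append (m : Int) (cs : List Char) (u v : List Char) :
    ∀ (a : Int) (t : pvStA),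
      pvRunA m cs a (u ++ v) t = pvRunA m cs (a + u.length) v (pvRunA m cs a u t) := by
  induction u with
  | nil => intro a t; simp [pvRunA]
  | cons c u ih =>
    intro a t
    simp only [List.cons_append, pvRunA, ih, List.length_cons]
    congr 1
    push_cast; ring

-- A's foldl over range(len(cs)) equals pvRunA on the corresponding suffix
theorem pvFoldl_eq_runA (m : Int) (cs : List Char) :
    ∀ (ys : List Char) (a : Int) (t : pvStA), 0 ≤ a → cs.drop a.toNat = ys →
      (PySem.List.pyRange a cs.length 1).foldl
        (fun t i => pvBodyA m cs t i (PySem.List.pyGetD cs i ' ')) t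
      = pvRunA m cs a ys t := by
  intro ys
  induction ys with
  | nil =>
    intro a t ha hdrop
    have hlen : (cs.length : Int) ≤ a := by
      have := List.drop_eq_nil_iff.mp hdrop
      omega
    rw [PySem.List.pyRange_one_eq_nil hlen]
    simp [pvRunA]
  | cons ch ys ih =>
    intro a t ha hdrop
    have hlt : a.toNat < cs.length := by
      by_contra hge
      rw [List.drop_eq_nil_iff.mpr (by omega)] at hdrop
      exact absurd hdrop (by simp)
    have haI : a < (cs.length : Int) := by omega
    rw [PySem.List.pyRange_one_cons haI]
    simp only [List.foldl_cons]
    have hget : PySem.List.pyGetD cs a ' ' = ch := by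
      rw [PySem.List.pyGetD_eq_getElem cs ' ' ha haI]
      have h2 := List.getElem_cons_drop (as := cs) (i := a.toNat) hlt
      rw [hdrop] at h2
      exact (List.cons.injEq _ _ _ _ ▸ h2).1
    have hdrop' : cs.drop (a + 1).toNat = ys := by
      have h1 : (a + 1).toNat = a.toNat + 1 := by omega
      rw [h1, ← List.tail_drop, hdrop, List.tail_cons]
    rw [hget]
    exact ih (a + 1) _ (by omega) hdrop'

-- B's outer loop, run as a structural recursion over the runs, state (slice_start, acc)
def pvBfold (m : Int) (cs : List Char) : List (List Char) → Int → Int × List String → Int × List String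
  | [], _, p => p
  | run :: rs, a, p =>
    pvBfold m cs rs (a + run.length)
      ((PySem.List.pyRange (a + m) (a + run.length) m).foldl (pvCutB cs) p)

theorem pvFoldlB_eq_Bfold (m : Int) (cs : List Char) :
    ∀ (rs : List (List Char)) (a : Int) (p : Int × List String),
      ((rs.foldl (pvBodyB m cs) (p.1, a, p.2)).1, (rs.foldl (pvBodyB m cs) (p.1, a, p.2)).2.2)
        = pvBfold m cs rs a p := by
  intro rs
  induction rs with
  | nil => intro a p; rfl
  | cons run rs ih =>
    intro a p
    simp only [List.foldl_cons, pvBodyB, pvBfold]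
    exact ih (a + run.length) _

-- processing a uniform run (all chars of type b) with counter state (c, b):
-- exactly the arithmetic-stride cuts of B, starting at a + (m − c)
theorem pvUniformRun (m : Int) (cs : List Char) (b : Bool) (hm : 1 ≤ m) :
    ∀ (ys : List Char) (a c st : Int) (acc : List String),
      (∀ x ∈ ys, PySem.Chars.isspace x = b) → 0 ≤ c → c ≤ m →
      ∃ c', 0 ≤ c' ∧ c' ≤ m ∧
        pvRunA m cs a ys (c, b, st, acc) =
          (c', b,
           ((PySem.List.pyRange (a + (m - c)) (a + (ys.length : Int)) m).foldl (pvCutB cs) (st, acc)).1,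
           ((PySem.List.pyRange (a + (m - c)) (a + (ys.length : Int)) m).foldl (pvCutB cs) (st, acc)).2) := by
  intro ys
  induction ys with
  | nil =>
    intro a c st acc _ hc0 hcm
    refine ⟨c, hc0, hcm, ?_⟩
    rw [pvPyRange_pos_eq_nil (by omega) (by simp only [List.length_nil]; push_cast; omega)]
    simp [pvRunA]
  | cons ch ys ih =>
    intro a c st acc hall hc0 hcm
    have hch : PySem.Chars.isspace ch = b := hall ch (List.mem_cons_self ..)
    have hrest : ∀ x ∈ ys, PySem.Chars.isspace x = b := fun x hx => hall x (List.mem_cons_of_mem _ hx)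
    simp only [pvRunA, pvBodyA, hch, bne_self_eq_false, if_neg Bool.false_ne_true]
    by_cases hcut : c + 1 > m
    · have hc : c = m := by omega
      simp only [if_pos hcut]
      obtain ⟨c', h0, h1, heq⟩ := ih (a + 1) 1 a (acc ++ [String.ofList (PySem.List.slice cs (some st) (some a))]) hrest (by omega) hm
      refine ⟨c', h0, h1, ?_⟩
      rw [heq]
      have hr : PySem.List.pyRange (a + (m - c)) (a + ((ch :: ys).length : Int)) m
          = a :: PySem.List.pyRange (a + 1 + (m - 1)) (a + 1 + (ys.length : Int)) m := by
        rw [hc]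
        have h1' : a + (m - m) = a := by ring
        rw [h1']
        rw [pvPyRange_pos_cons (by omega) (by simp only [List.length_cons]; push_cast; omega)]
        congr 1
        · congr 1
          · ring
          · simp only [List.length_cons]; push_cast; ring
      rw [hr]
      simp only [List.foldl_cons, pvCutB]
    · simp only [if_neg hcut]
      obtain ⟨c', h0, h1, heq⟩ := ih (a + 1) (c + 1) st acc hrest (by omega) (by omega)
      refine ⟨c', h0, h1, ?_⟩
      rw [heq]
      have hr2 : PySem.List.pyRange (a + (m - c)) (a + ((ch :: ys).length : Int)) m
          = PySem.List.pyRange (a + 1 + (m - (c + 1))) (a + 1 + (ys.length : Int)) m := by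
        congr 1
        · ring
        · simp only [List.length_cons]; push_cast; ring
      rw [hr2]

-- head of dropWhile does not satisfy the predicate
theorem pvHead_dropWhile_false {α : Type} (p : α → Bool) :
    ∀ (l : List α) (x : α) (xs : List α), l.dropWhile p = x :: xs → p x = false := by
  intro l
  induction l with
  | nil => intro x xs h; simp at h
  | cons c l ih =>
    intro x xs h
    rw [List.dropWhile_cons] at h
    by_cases hc : p c = true
    · rw [if_pos hc] at h; exact ih x xs h
    · rw [if_neg hc] at h
      cases h
      exact Bool.not_eq_true _ ▸ hc

-- main lemma: A's scan over any suffix, entered at a run boundary, equals B's per-run folding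
theorem pvMain (m : Int) (cs : List Char) (hm : 1 ≤ m) :
    ∀ (n : Nat) (ys : List Char), ys.length ≤ n →
    ∀ (a c0 st : Int) (prevB : Bool) (acc : List String),
      (∀ x xs, ys = x :: xs → prevB = PySem.Chars.isspace x → c0 = 0) →
      ((pvRunA m cs a ys (c0, prevB, st, acc)).2.2.1,
       (pvRunA m cs a ys (c0, prevB, st, acc)).2.2.2)
        = pvBfold m cs (pvRuns ys) a (st, acc) := by
  intro n
  induction n with
  | zero =>
    intro ys hlen a c0 st prevB acc _
    have : ys = [] := List.length_eq_zero_iff.mp (Nat.le_zero.mp hlen)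
    subst this
    simp [pvRunA, pvRuns, pvBfold]
  | succ n ih =>
    intro ys hlen a c0 st prevB acc hentry
    cases ys with
    | nil => simp [pvRunA, pvRuns, pvBfold]
    | cons ch r =>
      set p := fun d => PySem.Chars.isspace d == PySem.Chars.isspace ch with hp
      set b := PySem.Chars.isspace ch with hb
      -- first step yields state (1, b, st, acc)
      have hstep : pvBodyA m cs (c0, prevB, st, acc) a ch = (1, b, st, acc) := by
        by_cases hpb : prevB = b
        · have hc0 : c0 = 0 := hentry ch r rfl (by simpa [hb] using hpb)
          have hne : (prevB != PySem.Chars.isspace ch) = false := by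
            simp [bne_eq_false_iff_eq]
            rw [← hb]; exact hpb
          simp only [pvBodyA, hne, Bool.false_eq_true, if_false, hc0]
          rw [if_neg (by omega : ¬ (0 : Int) + 1 > m)]
          rw [hpb]
          norm_num
        · have hne : (prevB != PySem.Chars.isspace ch) = true := by
            simp [bne_iff_ne]
            rw [← hb]; exact hpb
          simp only [pvBodyA, hne, if_true, hb]
      have hsplit : r = r.takeWhile p ++ r.dropWhile p := (List.takeWhile_append_dropWhile).symm
      simp only [pvRunA, hstep]
      rw [show pvRunA m cs (a+1) r (1, b, st, acc)
            = pvRunA m cs (a+1) (r.takeWhile p ++ r.dropWhile p) (1, b, st, acc) from by rw [← hsplit]]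
      rw [pvRunA_append]
      have htw : ∀ x ∈ r.takeWhile p, PySem.Chars.isspace x = b := by
        intro x hx
        have := List.mem_takeWhile_imp hx
        simpa [hp, hb] using this
      obtain ⟨c', hc'0, hc'm, heq⟩ :=
        pvUniformRun m cs b hm (r.takeWhile p) (a + 1) 1 st acc htw (by omega) hm
      rw [heq]
      -- the rest starts (if nonempty) with a char of the other type
      have hrest : ∀ x xs, (r.dropWhile p) = x :: xs → (b : Bool) = PySem.Chars.isspace x → c' = 0 := by
        intro x xs hx hhead
        exfalso
        have hpx : p x = false := pvHead_dropWhile_false p r x xs hx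
        simp [hp, hb] at hpx
        exact hpx hhead.symm
      have hlen' : (r.dropWhile p).length ≤ n := by
        have h1 : (r.dropWhile p).length ≤ r.length := List.length_dropWhile_le _ _
        simp only [List.length_cons] at hlen
        omega
      rw [ih (r.dropWhile p) hlen' _ c' _ b _ hrest]
      -- match pvBfold on pvRuns (ch :: r)
      rw [show pvRuns (ch :: r) = (ch :: r.takeWhile p) :: pvRuns (r.dropWhile p) from by
            rw [pvRuns]]
      have e1 : a + 1 + ((r.takeWhile p).length : Int) = a + (((ch :: r.takeWhile p)).length : Int) := by
        simp only [List.length_cons]; push_cast; ring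
      have e2 : PySem.List.pyRange (a + 1 + (m - 1)) (a + 1 + ((r.takeWhile p).length : Int)) m
          = PySem.List.pyRange (a + m) (a + (((ch :: r.takeWhile p)).length : Int)) m := by
        rw [e1]; congr 1; ring
      rw [show pvBfold m cs ((ch :: r.takeWhile p) :: pvRuns (r.dropWhile p)) a (st, acc)
            = pvBfold m cs (pvRuns (r.dropWhile p)) (a + ((ch :: r.takeWhile p).length : Int))
                ((PySem.List.pyRange (a + m) (a + ((ch :: r.takeWhile p).length : Int)) m).foldl (pvCutB cs) (st, acc)) from rfl]
      rw [e2, e1]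

-- ===== VERDICT (by name: the statement is the Claim_ definition above) =====
theorem split_whitespaces_or_nonwhitespaces_py_spec : Claim_equal_split_whitespaces_or_nonwhitespaces_py := by
  intro s m _hdom hpre
  have hm : 1 ≤ m := hpre
  unfold Spec_split_whitespaces_or_nonwhitespaces_py
  unfold split_whitespaces_or_nonwhitespaces_py split_whitespaces_or_nonwhitespaces_py_alt
  simp only []
  rw [if_neg (not_le.mpr (by omega : (0:Int) < m))]
  by_cases hnil : s.toList.length = 0
  · rw [if_pos hnil, if_pos hnil]
  · rw [if_neg hnil, if_neg hnil]
    have hfold := pvFoldl_eq_runA m s.toList s.toList 0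
      (0, PySem.Chars.isspace (PySem.List.pyGetD s.toList 0 ' '), 0, []) (by omega) (by simp)
    rw [hfold]
    have hmain := pvMain m s.toList hm s.toList.length s.toList (le_refl _) 0 0 0
        (PySem.Chars.isspace (PySem.List.pyGetD s.toList 0 ' ')) []
        (fun _ _ _ _ => rfl)
    have hB := pvFoldlB_eq_Bfold m s.toList (pvRuns s.toList) 0 (0, [])
    have hcomb := hmain.trans hB.symm
    rw [Prod.mk.injEq] at hcomb
    rw [hcomb.1, hcomb.2]
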